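-- pv_equiv track=rewrite | github.com/tboudreaux/SAOSummer2018REU | code/General/nbodyPythonInterface/pyBodyModule/pyBody/utils/misc.py | load_list
-- ===== SOURCE A (Python) =====
-- def load_list(n, start, ntrue):
--     out = list()
--     for i in range(n):
--         if start <= i < start+ntrue:
--             out.append(True)
--         else:
--             out.append(False)
--     return out
-- ===== SOURCE B (Python) =====
-- def load_list(n, start, ntrue):
--     lo = max(0, min(start, n))
--     ntr = max(0, min(n, start + ntrue) - max(0, start))
--     return [False] * lo + [True] * ntr + [False] * (n - lo - ntr)
-- ===== Notes on version B (the rewrite author's own statement) =====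
-- stated objective: simpler
-- what changed: Replaces the per-index loop with a closed-form block construction: clamp the range to [0,n) and concatenate three multiplied segments [False]*lo + [True]*ntr + [False]*rest.
import Mathlib
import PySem

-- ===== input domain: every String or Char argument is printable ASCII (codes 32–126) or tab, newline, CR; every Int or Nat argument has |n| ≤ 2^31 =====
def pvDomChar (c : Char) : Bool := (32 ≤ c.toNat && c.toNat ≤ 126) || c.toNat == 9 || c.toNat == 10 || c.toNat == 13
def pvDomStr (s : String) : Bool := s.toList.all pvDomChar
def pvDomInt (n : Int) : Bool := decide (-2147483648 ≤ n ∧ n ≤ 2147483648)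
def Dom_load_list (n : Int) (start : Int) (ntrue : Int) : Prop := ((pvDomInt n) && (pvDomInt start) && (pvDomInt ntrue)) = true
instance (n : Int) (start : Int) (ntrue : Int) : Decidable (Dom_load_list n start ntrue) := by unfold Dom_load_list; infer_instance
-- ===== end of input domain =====

-- B builds the answer as three closed-form blocks instead of testing each index in a loop (simpler; return value only).

-- ===== PORT A =====
def load_list (n : Int) (start : Int) (ntrue : Int) : List Bool :=
  (PySem.List.pyRange 0 n 1).foldl
    (fun out i => out ++ [if start ≤ i ∧ i < start + ntrue then true else false]) []

-- ===== PORT B =====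
def load_list_alt (n : Int) (start : Int) (ntrue : Int) : List Bool :=
  let lo : Int := max 0 (min start n)
  let ntr : Int := max 0 (min n (start + ntrue) - max 0 start)
  List.replicate lo.toNat false ++ List.replicate ntr.toNat true ++
    List.replicate (n - lo - ntr).toNat false

-- ===== PRECONDITION & SPEC =====
def Spec_load_list (n : Int) (start : Int) (ntrue : Int) (out : List Bool) : Prop := out = load_list_alt n start ntrue
instance (n : Int) (start : Int) (ntrue : Int) (out : List Bool) : Decidable (Spec_load_list n start ntrue out) := by unfold Spec_load_list; infer_instance

-- ===== CLAIM (what is proved, stated in full; the proofs are below) =====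
def Claim_equal_load_list : Prop := ∀ (n : Int) (start : Int) (ntrue : Int), Dom_load_list n start ntrue → Spec_load_list n start ntrue (load_list n start ntrue)

-- ===== LEMMAS AND PROOFS =====

theorem foldl_append_singleton {α β : Type} (f : α → β) (l : List α) (acc : List β) :
    l.foldl (fun out i => out ++ [f i]) acc = acc ++ l.map f := by
  induction l generalizing acc with
  | nil => simp
  | cons x xs ih => simp [List.foldl, ih, List.append_assoc]

theorem load_list_eq_map (n start ntrue : Int) :
    load_list n start ntrue =
      (List.range n.toNat).map (fun (k : Nat) => if start ≤ (k : Int) ∧ (k : Int) < start + ntrue then true else false) := by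
  unfold load_list
  rw [PySem.List.pyRange_one, foldl_append_singleton, List.map_map]
  simp only [List.nil_append, Int.sub_zero]
  apply List.map_congr_left
  intro k _
  simp

theorem map_range_blocks (a b c : Nat) :
    (List.range (a + b + c)).map (fun k => decide (a ≤ k ∧ k < a + b)) =
      List.replicate a false ++ List.replicate b true ++ List.replicate c false := by
  apply List.ext_getElem
  · simp
    omega
  · intro k h1 h2
    simp only [List.getElem_map, List.getElem_range, List.getElem_append,
      List.getElem_replicate, List.length_replicate, List.length_append]
    split_ifs <;> simp <;> omega

-- ===== VERDICT (by name: the statement is the Claim_ definition above) =====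
theorem load_list_spec : Claim_equal_load_list := by
  intro n start ntrue _
  show load_list n start ntrue = load_list_alt n start ntrue
  rw [load_list_eq_map]
  unfold load_list_alt
  have hsplit : n.toNat =
      (max 0 (min start n)).toNat + (max 0 (min n (start + ntrue) - max 0 start)).toNat +
        (n - max 0 (min start n) - max 0 (min n (start + ntrue) - max 0 start)).toNat := by
    omega
  rw [hsplit, ← map_range_blocks]
  apply List.map_congr_left
  intro k hk
  rw [List.mem_range] at hk
  have hiff : (start ≤ (k : Int) ∧ (k : Int) < start + ntrue) ↔
      ((max 0 (min start n)).toNat ≤ k ∧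
        k < (max 0 (min start n)).toNat + (max 0 (min n (start + ntrue) - max 0 start)).toNat) := by
    omega
  simp [hiff]
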